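-- pv_equiv track=rewrite | github.com/realFincho/Competitive-pyprogramming | strings/z-function.py | common_prefix_suffix2
-- ===== SOURCE A (Python) =====
-- def common_prefix_suffix2(s):
--     m = len(s)
--     occur = 0
--     # substring length 1 -- m-1
--     for i in range(1, m):
--         # substring position 0 -- m-1-i
--         for j in range(m - i + 1):
--             if (s[:i] == s[j:j + i]) != (s[m - i:] == s[j:j + i]):
--                 occur += 1
--     return occur
-- ===== SOURCE B (Python) =====
-- def common_prefix_suffix2(s):
--     m = len(s)
--     # p[j] = longest common prefix of s and s[j:]
--     p = []
--     for j in range(m):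
--         t = 0
--         while j + t < m and s[t] == s[j + t]:
--             t += 1
--         p.append(t)
--     # q[k] = longest common suffix of s and s[:k+1]
--     q = []
--     for k in range(m):
--         t = 0
--         while t <= k and s[k - t] == s[m - 1 - t]:
--             t += 1
--         q.append(t)
--     occur = 0
--     for i in range(1, m):
--         for j in range(m - i + 1):
--             if (p[j] >= i) != (q[j + i - 1] >= i):
--                 occur += 1
--     return occur
-- ===== Notes on version B (the rewrite author's own statement) =====
-- stated objective: faster
-- what changed: B precomputes two arrays once (p[j] = longest common prefix of s and s[j:], q[k] = longest common suffix of s and s[:k+1]) so each of the O(m^2) pair checks becomes two O(1) integer threshold tests instead of two O(m) slice comparisons.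
import Mathlib
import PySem

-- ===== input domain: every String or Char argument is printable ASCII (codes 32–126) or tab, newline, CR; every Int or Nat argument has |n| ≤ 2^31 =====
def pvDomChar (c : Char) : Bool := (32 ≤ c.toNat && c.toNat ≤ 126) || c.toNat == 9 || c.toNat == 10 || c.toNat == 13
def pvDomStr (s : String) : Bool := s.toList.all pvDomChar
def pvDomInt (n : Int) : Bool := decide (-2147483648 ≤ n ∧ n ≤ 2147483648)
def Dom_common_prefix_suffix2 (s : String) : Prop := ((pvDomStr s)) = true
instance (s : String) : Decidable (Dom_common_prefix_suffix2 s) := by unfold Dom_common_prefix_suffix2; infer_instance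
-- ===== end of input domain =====

-- B precomputes longest-common-prefix/suffix arrays once so each of the O(m^2) checks is O(1)
-- instead of an O(m) slice comparison: O(m^2) total vs A's O(m^3); same return value for every string.

-- ===== PORT A =====
-- Literal transliteration of A: for i in range(1, m): for j in range(m-i+1):
--   count positions where (s[:i] == s[j:j+i]) != (s[m-i:] == s[j:j+i]).
def common_prefix_suffix2 (s : String) : Int :=
  let l := s.toList
  let m : Int := l.length
  (PySem.List.pyRange 1 m 1).foldl (fun occur i =>
    (PySem.List.pyRange 0 (m - i + 1) 1).foldl (fun occur j =>
      if (PySem.List.slice l none (some i) == PySem.List.slice l (some j) (some (j + i)))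
          ≠ (PySem.List.slice l (some (m - i)) none == PySem.List.slice l (some j) (some (j + i)))
      then occur + 1 else occur) occur) 0

-- ===== PORT B =====
-- Source B's inner while loop `t = 0; while j + t < m and s[t] == s[j+t]: t += 1` (indices are
-- always in range there, so `getD` is exact).
def pLoop (l : List Char) (j t : Nat) : Nat :=
  if h : j + t < l.length ∧ l.getD t ' ' = l.getD (j + t) ' ' then pLoop l j (t + 1) else t
termination_by l.length - (j + t)
decreasing_by omega

-- Source B's inner while loop `t = 0; while t <= k and s[k-t] == s[m-1-t]: t += 1` (called with
-- k < m, so indices are in range and `getD` is exact).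
def qLoop (l : List Char) (k t : Nat) : Nat :=
  if h : t ≤ k ∧ l.getD (k - t) ' ' = l.getD (l.length - 1 - t) ' ' then qLoop l k (t + 1) else t
termination_by k + 1 - t
decreasing_by omega

-- Transliteration of Source B: build p (for-append loop = map over range), build q, then the same
-- double loop as A but with the O(1) test (p[j] >= i) != (q[j+i-1] >= i).
def common_prefix_suffix2_alt (s : String) : Int :=
  let l := s.toList
  let m : Int := l.length
  let p : List Int := (PySem.List.pyRange 0 m 1).map (fun j => (pLoop l j.toNat 0 : Int))
  let q : List Int := (PySem.List.pyRange 0 m 1).map (fun k => (qLoop l k.toNat 0 : Int))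
  (PySem.List.pyRange 1 m 1).foldl (fun occur i =>
    (PySem.List.pyRange 0 (m - i + 1) 1).foldl (fun occur j =>
      if (decide (i ≤ PySem.List.pyGetD p j 0)) ≠ (decide (i ≤ PySem.List.pyGetD q (j + i - 1) 0))
      then occur + 1 else occur) occur) 0

-- ===== PRECONDITION & SPEC =====
def Spec_common_prefix_suffix2 (s : String) (out : Int) : Prop := out = common_prefix_suffix2_alt s
instance (s : String) (out : Int) : Decidable (Spec_common_prefix_suffix2 s out) := by unfold Spec_common_prefix_suffix2; infer_instance

-- ===== CLAIM (what is proved, stated in full; the proofs are below) =====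
def Claim_equal_common_prefix_suffix2 : Prop := ∀ (s : String), Dom_common_prefix_suffix2 s → Spec_common_prefix_suffix2 s (common_prefix_suffix2 s)

-- ===== LEMMAS AND PROOFS =====

-- Length of the longest common prefix of two character lists.
def matchLen : List Char → List Char → Nat
  | x :: xs, y :: ys => if x = y then matchLen xs ys + 1 else 0
  | _, _ => 0

lemma matchLen_nil_right (a : List Char) : matchLen a [] = 0 := by
  cases a <;> rfl

lemma matchLen_nil_left (b : List Char) : matchLen [] b = 0 := by
  cases b <;> rfl

lemma pLoop_eq_aux (l : List Char) (j : Nat) :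
    ∀ (n t : Nat), l.length - (j + t) ≤ n →
      pLoop l j t = t + matchLen (l.drop t) (l.drop (j + t)) := by
  intro n
  induction n with
  | zero =>
    intro t h
    have hge : l.length ≤ j + t := by omega
    rw [pLoop, dif_neg (by omega), show l.drop (j + t) = [] from List.drop_eq_nil_of_le hge,
      matchLen_nil_right, Nat.add_zero]
  | succ n ih =>
    intro t h
    rw [pLoop]
    split_ifs with hc
    · obtain ⟨hlt, heq⟩ := hc
      have ht : t < l.length := by omega
      rw [List.drop_eq_getElem_cons ht, List.drop_eq_getElem_cons hlt]
      rw [List.getD_eq_getElem l ' ' ht, List.getD_eq_getElem l ' ' hlt] at heq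
      rw [ih (t + 1) (by omega)]
      simp only [matchLen, if_pos heq]
      have : j + (t + 1) = j + t + 1 := by omega
      rw [this]
      omega
    · rw [Decidable.not_and_iff_or_not] at hc
      rcases hc with hge | hne
      · rw [show l.drop (j + t) = [] from List.drop_eq_nil_of_le (by omega), matchLen_nil_right, Nat.add_zero]
      · by_cases hlt : j + t < l.length
        · have ht : t < l.length := by omega
          rw [List.drop_eq_getElem_cons ht, List.drop_eq_getElem_cons hlt]
          rw [List.getD_eq_getElem l ' ' ht, List.getD_eq_getElem l ' ' hlt] at hne
          simp [matchLen, hne]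
        · rw [show l.drop (j + t) = [] from List.drop_eq_nil_of_le (by omega), matchLen_nil_right, Nat.add_zero]

lemma pLoop_eq (l : List Char) (j : Nat) :
    pLoop l j 0 = matchLen l (l.drop j) := by
  simpa using pLoop_eq_aux l j (l.length - j) 0 (by omega)

lemma qLoop_eq_aux (l : List Char) (k : Nat) (hk : k < l.length) :
    ∀ (n t : Nat), k + 1 - t ≤ n →
      qLoop l k t = t + matchLen (((l.take (k + 1)).reverse).drop t) ((l.reverse).drop t) := by
  intro n
  induction n with
  | zero =>
    intro t h
    have hlenX : ((l.take (k + 1)).reverse).length = k + 1 := by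
      simp; omega
    rw [qLoop, dif_neg (by omega),
      show ((l.take (k + 1)).reverse).drop t = [] from List.drop_eq_nil_of_le (by omega),
      matchLen_nil_left, Nat.add_zero]
  | succ n ih =>
    intro t h
    have hlenX : ((l.take (k + 1)).reverse).length = k + 1 := by
      simp; omega
    rw [qLoop]
    split_ifs with hc
    · obtain ⟨htk, heq⟩ := hc
      have htX : t < ((l.take (k + 1)).reverse).length := by omega
      have htY : t < l.reverse.length := by simp; omega
      rw [List.drop_eq_getElem_cons htX, List.drop_eq_getElem_cons htY]
      have hXt : ((l.take (k + 1)).reverse)[t] = l[k - t]'(by omega) := by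
        rw [List.getElem_reverse, List.getElem_take]
        congr 1
        rw [List.length_take]
        omega
      have hYt : (l.reverse)[t] = l[l.length - 1 - t]'(by omega) := by
        rw [List.getElem_reverse]
      rw [List.getD_eq_getElem l ' ' (by omega : k - t < l.length),
          List.getD_eq_getElem l ' ' (by omega : l.length - 1 - t < l.length)] at heq
      rw [ih (t + 1) (by omega)]
      simp only [matchLen, hXt, hYt, if_pos heq]
      omega
    · rw [Decidable.not_and_iff_or_not] at hc
      rcases hc with hgt | hne
      · rw [show ((l.take (k + 1)).reverse).drop t = [] from List.drop_eq_nil_of_le (by omega),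
          matchLen_nil_left, Nat.add_zero]
      · by_cases htk : t ≤ k
        · have htX : t < ((l.take (k + 1)).reverse).length := by omega
          have htY : t < l.reverse.length := by simp; omega
          rw [List.drop_eq_getElem_cons htX, List.drop_eq_getElem_cons htY]
          have hXt : ((l.take (k + 1)).reverse)[t] = l[k - t]'(by omega) := by
            rw [List.getElem_reverse, List.getElem_take]
            congr 1
            rw [List.length_take]
            omega
          have hYt : (l.reverse)[t] = l[l.length - 1 - t]'(by omega) := by
            rw [List.getElem_reverse]
          rw [List.getD_eq_getElem l ' ' (by omega : k - t < l.length),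
              List.getD_eq_getElem l ' ' (by omega : l.length - 1 - t < l.length)] at hne
          simp [matchLen, hXt, hYt, hne]
        · rw [show ((l.take (k + 1)).reverse).drop t = [] from List.drop_eq_nil_of_le (by omega),
            matchLen_nil_left, Nat.add_zero]

lemma qLoop_eq (l : List Char) (k : Nat) (hk : k < l.length) :
    qLoop l k 0 = matchLen ((l.take (k + 1)).reverse) (l.reverse) := by
  simpa using qLoop_eq_aux l k hk (k + 1) 0 (by omega)

lemma take_eq_iff_le_matchLen :
    ∀ (i : Nat) (a b : List Char), i ≤ a.length → i ≤ b.length →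
      (a.take i = b.take i ↔ i ≤ matchLen a b) := by
  intro i
  induction i with
  | zero => intro a b _ _; simp
  | succ i ih =>
    intro a b ha hb
    match a, b with
    | x :: xs, y :: ys =>
      simp only [List.take_succ_cons, List.cons.injEq, matchLen]
      constructor
      · rintro ⟨rfl, hts⟩
        rw [if_pos rfl]
        have := (ih xs ys (by simpa using ha) (by simpa using hb)).mp hts
        omega
      · intro hle
        by_cases hxy : x = y
        · rw [if_pos hxy] at hle
          exact ⟨hxy, (ih xs ys (by simpa using ha) (by simpa using hb)).mpr (by omega)⟩
        · rw [if_neg hxy] at hle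
          omega

-- prefix test: s[:i] == s[j:j+i]  ↔  i ≤ p[j]
lemma prefix_cond (l : List Char) (iN jN : Nat) (hi : 1 ≤ iN) (hji : jN + iN ≤ l.length) :
    (l.take iN = (l.drop jN).take iN ↔ iN ≤ pLoop l jN 0) := by
  rw [pLoop_eq]
  exact take_eq_iff_le_matchLen iN l (l.drop jN) (by omega) (by simp; omega)

-- suffix test: s[m-i:] == s[j:j+i]  ↔  i ≤ q[j+i-1]
lemma suffix_cond (l : List Char) (iN jN : Nat) (hi : 1 ≤ iN) (hji : jN + iN ≤ l.length) :
    (l.drop (l.length - iN) = (l.drop jN).take iN ↔ iN ≤ qLoop l (jN + iN - 1) 0) := by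
  have hk : jN + iN - 1 < l.length := by omega
  rw [qLoop_eq l _ hk]
  have hk1 : jN + iN - 1 + 1 = jN + iN := by omega
  rw [hk1]
  have h1 : (l.drop (l.length - iN)).reverse = l.reverse.take iN := by
    rw [List.reverse_drop]
    congr 1
    omega
  have h2 : ((l.drop jN).take iN).reverse = (l.take (jN + iN)).reverse.take iN := by
    rw [List.take_drop, List.reverse_drop]
    congr 1
    simp
    omega
  constructor
  · intro he
    have : (l.take (jN + iN)).reverse.take iN = l.reverse.take iN := by
      rw [← h1, ← h2, he]
    exact (take_eq_iff_le_matchLen iN _ _ (by simp; omega) (by simp; omega)).mp this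
  · intro hle
    have hXY := (take_eq_iff_le_matchLen iN ((l.take (jN + iN)).reverse) l.reverse
      (by simp; omega) (by simp; omega)).mpr hle
    exact List.reverse_injective ((h1.trans hXY.symm).trans h2.symm)

-- the inner if-conditions of the two double loops agree at every in-range (i, j)
lemma body_cond_eq (l : List Char) (i j : Int) (hi1 : 1 ≤ i) (hi2 : i < (l.length : Int))
    (hj1 : 0 ≤ j) (hj2 : j < (l.length : Int) - i + 1) :
    ((PySem.List.slice l none (some i) == PySem.List.slice l (some j) (some (j + i)))
        ≠ (PySem.List.slice l (some ((l.length : Int) - i)) none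
            == PySem.List.slice l (some j) (some (j + i)))) ↔
      ((decide (i ≤ PySem.List.pyGetD
          ((PySem.List.pyRange 0 (l.length : Int) 1).map (fun j => (pLoop l j.toNat 0 : Int))) j 0))
        ≠ (decide (i ≤ PySem.List.pyGetD
          ((PySem.List.pyRange 0 (l.length : Int) 1).map (fun k => (qLoop l k.toNat 0 : Int)))
          (j + i - 1) 0))) := by
  have hiv : i = ((i.toNat : Nat) : Int) := (Int.toNat_of_nonneg (by omega)).symm
  have hjv : j = ((j.toNat : Nat) : Int) := (Int.toNat_of_nonneg hj1).symm
  set iN := i.toNat with hiN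
  set jN := j.toNat with hjN
  have hi1N : 1 ≤ iN := by omega
  have hji : jN + iN ≤ l.length := by omega
  rw [hiv, hjv]
  have e1 : PySem.List.slice l none (some ((iN : Nat) : Int)) = l.take iN :=
    PySem.List.slice_to_natCast l iN
  have e2 : PySem.List.slice l (some ((jN : Nat) : Int)) (some (((jN : Nat) : Int) + ((iN : Nat) : Int)))
      = (l.drop jN).take iN := PySem.List.slice_natCast_add l jN iN
  have em : (l.length : Int) - ((iN : Nat) : Int) = (((l.length - iN : Nat)) : Int) := by omega
  have e3 : PySem.List.slice l (some ((l.length : Int) - ((iN : Nat) : Int))) none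
      = l.drop (l.length - iN) := by
    rw [em]
    exact PySem.List.slice_from_natCast l (l.length - iN)
  have e4 : PySem.List.pyGetD
      ((PySem.List.pyRange 0 (l.length : Int) 1).map (fun j => (pLoop l j.toNat 0 : Int)))
      ((jN : Nat) : Int) 0 = ((pLoop l jN 0 : Nat) : Int) := by
    rw [PySem.List.pyGetD_map_pyRange (fun j => (pLoop l j.toNat 0 : Int)) l.length jN 0 (by omega)]
    simp
  have ek : ((jN : Nat) : Int) + ((iN : Nat) : Int) - 1 = (((jN + iN - 1 : Nat)) : Int) := by omega
  have e5 : PySem.List.pyGetD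
      ((PySem.List.pyRange 0 (l.length : Int) 1).map (fun k => (qLoop l k.toNat 0 : Int)))
      (((jN : Nat) : Int) + ((iN : Nat) : Int) - 1) 0 = ((qLoop l (jN + iN - 1) 0 : Nat) : Int) := by
    rw [ek, PySem.List.pyGetD_map_pyRange (fun k => (qLoop l k.toNat 0 : Int)) l.length
      (jN + iN - 1) 0 (by omega)]
    simp
  rw [e1, e2, e3, e4, e5]
  have hb1 : (l.take iN == (l.drop jN).take iN)
      = decide (((iN : Nat) : Int) ≤ ((pLoop l jN 0 : Nat) : Int)) := by
    rw [Bool.eq_iff_iff]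
    simp only [beq_iff_eq, decide_eq_true_eq, Nat.cast_le]
    exact prefix_cond l iN jN hi1N hji
  have hb2 : (l.drop (l.length - iN) == (l.drop jN).take iN)
      = decide (((iN : Nat) : Int) ≤ ((qLoop l (jN + iN - 1) 0 : Nat) : Int)) := by
    rw [Bool.eq_iff_iff]
    simp only [beq_iff_eq, decide_eq_true_eq, Nat.cast_le]
    exact suffix_cond l iN jN hi1N hji
  rw [hb1, hb2]

-- ===== VERDICT (by name: the statement is the Claim_ definition above) =====
theorem common_prefix_suffix2_spec : Claim_equal_common_prefix_suffix2 := by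
  intro s _
  unfold Spec_common_prefix_suffix2
  simp only [common_prefix_suffix2, common_prefix_suffix2_alt]
  apply PySem.List.foldl_congr_mem
  intro occur i hi
  rw [PySem.List.mem_pyRange_one] at hi
  apply PySem.List.foldl_congr_mem
  intro acc j hj
  rw [PySem.List.mem_pyRange_one] at hj
  exact if_congr
    (body_cond_eq s.toList i j hi.1 hi.2 hj.1 hj.2) rfl rfl
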